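-- pv_equiv track=rewrite | github.com/oryden/small_code_challanges | project_euler/project_euler_problem_79.py | first_number_list_creator
-- ===== SOURCE A (Python) =====
-- def find_unique_numbers(sign_ins):
--     numbers_list = []
--     for number in range(0, 10):
--         for sign_in in sign_ins:
--             if sign_in.find(str(number)) >= 0:
--                 numbers_list.append(number)
--                 break
--     return numbers_list
--
-- def first_number_list_creator(sign_ins):
--     numbers_list = find_unique_numbers(sign_ins)
--     first_number_list = []
--     for number_loop in numbers_list:
--         first_number = True
--         for sign_in_loop in sign_ins:
--             if sign_in_loop.find(str(number_loop)) > 0: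
--                 first_number = False
--                 break
--         if first_number:
--             first_number_list.append(number_loop)
--
--     return first_number_list
-- ===== SOURCE B (Python) =====
-- def first_number_list_creator(sign_ins):
--     present = set()
--     nonfirst = set()
--     for s in sign_ins:
--         for ch in s:
--             present.add(ch)
--             if ch != s[0]:
--                 nonfirst.add(ch)
--     return [i for i, c in enumerate("0123456789") if c in present and c not in nonfirst]
-- ===== Notes on version B (the rewrite author's own statement) =====
-- stated objective: faster
-- what changed: Replaces the 10x nested rescans of sign_ins (two passes per digit via str.find) with a single pass over all characters building a 'present' set and a 'nonfirst' set (chars occurring in a string whose first char differs), then one ordered filter over the ten digits.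
import Mathlib
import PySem

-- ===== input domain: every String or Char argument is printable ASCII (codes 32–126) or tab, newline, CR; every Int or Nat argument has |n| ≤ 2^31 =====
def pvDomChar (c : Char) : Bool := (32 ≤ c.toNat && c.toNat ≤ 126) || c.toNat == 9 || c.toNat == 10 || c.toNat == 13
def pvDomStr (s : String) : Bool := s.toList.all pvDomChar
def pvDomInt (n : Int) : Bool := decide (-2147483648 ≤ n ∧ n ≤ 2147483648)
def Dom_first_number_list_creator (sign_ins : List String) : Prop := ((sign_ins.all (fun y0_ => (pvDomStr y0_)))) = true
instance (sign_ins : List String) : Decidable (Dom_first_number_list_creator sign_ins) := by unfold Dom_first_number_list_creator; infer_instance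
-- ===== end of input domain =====

-- B replaces the ten per-digit rescans of sign_ins with one pass building a 'present' and a 'nonfirst' character set, then one ordered filter over the digits.

-- ===== PORT A =====
-- inner 'for sign_in in sign_ins: if sign_in.find(str(number)) >= 0: append; break' — the break loop as recursion
def fnlcFound (sign_ins : List String) (numStr : String) : Bool :=
  match sign_ins with
  | [] => false
  | s :: rest => if 0 ≤ PySem.Str.find s numStr then true else fnlcFound rest numStr

def find_unique_numbers (sign_ins : List String) : List Int :=
  (PySem.List.pyRange 0 10 1).foldl
    (fun acc number =>
      if fnlcFound sign_ins (PySem.Int.toStr number) then acc ++ [number] else acc) []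

-- inner 'for sign_in_loop in sign_ins: if sign_in_loop.find(str(number_loop)) > 0: first_number = False; break'
def fnlcLater (sign_ins : List String) (numStr : String) : Bool :=
  match sign_ins with
  | [] => false
  | s :: rest => if 0 < PySem.Str.find s numStr then true else fnlcLater rest numStr

def first_number_list_creator (sign_ins : List String) : List Int :=
  (find_unique_numbers sign_ins).foldl
    (fun acc number_loop =>
      if fnlcLater sign_ins (PySem.Int.toStr number_loop) then acc
      else acc ++ [number_loop]) []

-- ===== PORT B =====
-- 'for ch in s: present.add(ch); if ch != s[0]: nonfirst.add(ch)' (s[0] is the head; the loop only runs when s is nonempty)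
def fnlcScan (pn : PySem.Set Char × PySem.Set Char) (cs : List Char) :
    PySem.Set Char × PySem.Set Char :=
  match cs with
  | [] => pn
  | c0 :: _ =>
    cs.foldl (fun q ch =>
      (PySem.Set.add q.1 ch, if ch ≠ c0 then PySem.Set.add q.2 ch else q.2)) pn

def first_number_list_creator_alt (sign_ins : List String) : List Int :=
  let pn := sign_ins.foldl (fun q s => fnlcScan q s.toList)
              ((PySem.Set.empty : PySem.Set Char), (PySem.Set.empty : PySem.Set Char))
  (PySem.List.enumerate "0123456789".toList 0).filterMap (fun ic =>
    if PySem.Set.contains pn.1 ic.2 && !PySem.Set.contains pn.2 ic.2 then some ic.1 else none)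

-- ===== PRECONDITION & SPEC =====
def Spec_first_number_list_creator (sign_ins : List String) (out : List Int) : Prop := out = first_number_list_creator_alt sign_ins
instance (sign_ins : List String) (out : List Int) : Decidable (Spec_first_number_list_creator sign_ins out) := by unfold Spec_first_number_list_creator; infer_instance

-- ===== CLAIM (what is proved, stated in full; the proofs are below) =====
def Claim_equal_first_number_list_creator : Prop := ∀ (sign_ins : List String), Dom_first_number_list_creator sign_ins → Spec_first_number_list_creator sign_ins (first_number_list_creator sign_ins)

-- ===== LEMMAS AND PROOFS =====

-- A's per-string test, abstracted: digit char occurs somewhere / occurs in a string not starting with it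
def presentP (l : List String) (c : Char) : Bool := l.any (fun s => decide (c ∈ s.toList))
def nonfirstP (l : List String) (c : Char) : Bool :=
  l.any (fun s => decide (c ∈ s.toList) && (s.toList.head? != some c))

theorem singleton_infix_iff_mem {c : Char} {cs : List Char} : [c] <:+: cs ↔ c ∈ cs := by
  constructor
  · intro h; exact h.sublist.subset (List.mem_singleton_self c)
  · intro h
    obtain ⟨l, r, rfl⟩ := List.append_of_mem h
    exact ⟨l, r, by simp⟩

theorem singleton_prefix_iff_head {c : Char} {cs : List Char} :
    [c] <+: cs ↔ cs.head? = some c := by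
  cases cs with
  | nil => simp
  | cons c0 t =>
    constructor
    · intro h
      have := (List.cons_prefix_cons.mp h).1
      simp [this]
    · intro h
      have hc : c = c0 := by simpa using h.symm
      subst hc
      exact List.cons_prefix_cons.mpr ⟨rfl, List.nil_prefix⟩

theorem find1_nonneg {cs : List Char} {c : Char} :
    (0 ≤ PySem.Chars.find cs [c]) ↔ c ∈ cs := by
  rw [PySem.Chars.find_nonneg_iff, singleton_infix_iff_mem]

theorem find1_pos {cs : List Char} {c : Char} :
    (0 < PySem.Chars.find cs [c]) ↔ c ∈ cs ∧ cs.head? ≠ some c := by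
  constructor
  · intro h
    have hnn : 0 ≤ PySem.Chars.find cs [c] := le_of_lt h
    refine ⟨find1_nonneg.mp hnn, ?_⟩
    intro hh
    have hs := (PySem.Chars.find_spec hnn).2 0 (by omega)
    exact hs (by simpa [singleton_prefix_iff_head] using hh)
  · rintro ⟨hm, hh⟩
    have hnn : 0 ≤ PySem.Chars.find cs [c] := find1_nonneg.mpr hm
    rcases lt_or_eq_of_le hnn with h | h
    · exact h
    · exfalso
      have := (PySem.Chars.find_spec hnn).1
      rw [← h] at this
      simp at this
      exact hh (singleton_prefix_iff_head.mp this)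

theorem fnlcFound_eq (l : List String) (t : String) (c : Char) (ht : t.toList = [c]) :
    fnlcFound l t = presentP l c := by
  induction l with
  | nil => rfl
  | cons s rest ih =>
    simp only [fnlcFound, presentP, List.any_cons] at *
    rw [show PySem.Str.find s t = PySem.Chars.find s.toList t.toList from by simp, ht]
    by_cases h : c ∈ s.toList
    · simp [find1_nonneg.mpr h, h]
    · have h2 : ¬ (0 ≤ PySem.Chars.find s.toList [c]) := fun hc => h (find1_nonneg.mp hc)
      simp [h2, h, ih]

theorem fnlcLater_eq (l : List String) (t : String) (c : Char) (ht : t.toList = [c]) :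
    fnlcLater l t = nonfirstP l c := by
  induction l with
  | nil => rfl
  | cons s rest ih =>
    simp only [fnlcLater, nonfirstP, List.any_cons] at *
    rw [show PySem.Str.find s t = PySem.Chars.find s.toList t.toList from by simp, ht]
    by_cases h : 0 < PySem.Chars.find s.toList [c]
    · obtain ⟨hm, hh⟩ := find1_pos.mp h
      simp [h, hm, hh, bne_iff_ne]
    · have hnot : ¬ (c ∈ s.toList ∧ s.toList.head? ≠ some c) := fun hc => h (find1_pos.mpr hc)
      by_cases hm : c ∈ s.toList
      · have hh : s.toList.head? = some c := by
          by_contra hhh; exact hnot ⟨hm, hhh⟩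
        simp [h, hm, hh, ih]
      · simp [h, hm, ih]

theorem mem_scan_inner (cs : List Char) (c0 : Char) (pn : PySem.Set Char × PySem.Set Char)
    (c : Char) :
    (c ∈ (cs.foldl (fun q ch =>
        (PySem.Set.add q.1 ch, if ch ≠ c0 then PySem.Set.add q.2 ch else q.2)) pn).1 ↔
      c ∈ pn.1 ∨ c ∈ cs) ∧
    (c ∈ (cs.foldl (fun q ch =>
        (PySem.Set.add q.1 ch, if ch ≠ c0 then PySem.Set.add q.2 ch else q.2)) pn).2 ↔
      c ∈ pn.2 ∨ (c ∈ cs ∧ c ≠ c0)) := by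
  induction cs generalizing pn with
  | nil => simp
  | cons x xs ih =>
    simp only [List.foldl_cons]
    constructor
    · rw [(ih _).1]
      simp [PySem.Set.mem_add]
      tauto
    · rw [(ih _).2]
      by_cases hx : x ≠ c0
      · simp [hx, PySem.Set.mem_add]
        constructor
        · rintro ((h | rfl) | h)
          · exact Or.inl h
          · exact Or.inr ⟨Or.inl rfl, hx⟩
          · exact Or.inr ⟨Or.inr h.1, h.2⟩
        · rintro (h | ⟨(rfl | hm), hc⟩)
          · exact Or.inl (Or.inl h)
          · exact Or.inl (Or.inr rfl)
          · exact Or.inr ⟨hm, hc⟩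
      · rw [not_not] at hx; subst hx
        simp
        constructor
        · rintro (h | h)
          · exact Or.inl h
          · exact Or.inr ⟨Or.inr h.1, h.2⟩
        · rintro (h | ⟨(rfl | hm), hc⟩)
          · exact Or.inl h
          · exact absurd rfl hc
          · exact Or.inr ⟨hm, hc⟩

theorem mem_scan (cs : List Char) (pn : PySem.Set Char × PySem.Set Char) (c : Char) :
    (c ∈ (fnlcScan pn cs).1 ↔ c ∈ pn.1 ∨ c ∈ cs) ∧
    (c ∈ (fnlcScan pn cs).2 ↔ c ∈ pn.2 ∨ (c ∈ cs ∧ cs.head? ≠ some c)) := by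
  cases cs with
  | nil => simp [fnlcScan]
  | cons c0 t =>
    have h := mem_scan_inner (c0 :: t) c0 pn c
    unfold fnlcScan
    refine ⟨h.1, ?_⟩
    rw [h.2]
    simp [eq_comm]

theorem mem_fold_scan (l : List String) (pn : PySem.Set Char × PySem.Set Char) (c : Char) :
    (c ∈ (l.foldl (fun q s => fnlcScan q s.toList) pn).1 ↔ c ∈ pn.1 ∨ presentP l c = true) ∧
    (c ∈ (l.foldl (fun q s => fnlcScan q s.toList) pn).2 ↔ c ∈ pn.2 ∨ nonfirstP l c = true) := by
  induction l generalizing pn with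
  | nil => simp [presentP, nonfirstP]
  | cons s rest ih =>
    simp only [List.foldl_cons]
    constructor
    · rw [(ih _).1, (mem_scan s.toList pn c).1]
      simp [presentP]
      tauto
    · rw [(ih _).2, (mem_scan s.toList pn c).2]
      simp [nonfirstP]
      tauto

-- 'if p then acc else acc ++ [x]' loop = filter by !p
theorem foldl_skip_if {α : Type} (p : α → Bool) (l : List α) (acc : List α) :
    l.foldl (fun acc x => if p x then acc else acc ++ [x]) acc
      = acc ++ l.filter (fun x => !p x) := by
  induction l generalizing acc with
  | nil => simp
  | cons x xs ih =>
    by_cases h : p x <;> simp [h, ih]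

theorem filterMap_if_pairs {α β : Type} (q : α × β → Bool) (l : List (α × β)) :
    l.filterMap (fun ic => if q ic then some ic.1 else none)
      = (l.filter q).map Prod.fst := by
  induction l with
  | nil => rfl
  | cons x xs ih =>
    by_cases h : q x <;> simp [h, ih]

-- ===== VERDICT (by name: the statement is the Claim_ definition above) =====
theorem first_number_list_creator_spec : Claim_equal_first_number_list_creator := by
  intro l _
  unfold Spec_first_number_list_creator
  -- notation
  set pn := l.foldl (fun q s => fnlcScan q s.toList)
      ((PySem.Set.empty : PySem.Set Char), (PySem.Set.empty : PySem.Set Char)) with hpn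
  have hP : ∀ c, PySem.Set.contains pn.1 c = presentP l c := by
    intro c
    rw [Bool.eq_iff_iff, PySem.Set.contains_iff, (mem_fold_scan l _ c).1]
    simp [PySem.Set.empty]
  have hN : ∀ c, PySem.Set.contains pn.2 c = nonfirstP l c := by
    intro c
    rw [Bool.eq_iff_iff, PySem.Set.contains_iff, (mem_fold_scan l _ c).2]
    simp [PySem.Set.empty]
  -- A as a filter over [0..9]
  have hA : first_number_list_creator l
      = (PySem.List.pyRange 0 10 1).filter
          (fun n => fnlcFound l (PySem.Int.toStr n) && !fnlcLater l (PySem.Int.toStr n)) := by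
    unfold first_number_list_creator find_unique_numbers
    rw [PySem.List.foldl_append_if_eq_filter, foldl_skip_if]
    simp [List.filter_filter, Bool.and_comm]
  -- B as a filter over the enumerated digits
  have hB : first_number_list_creator_alt l
      = ((PySem.List.enumerate "0123456789".toList 0).filter
          (fun ic => PySem.Set.contains pn.1 ic.2 && !PySem.Set.contains pn.2 ic.2)).map Prod.fst := by
    unfold first_number_list_creator_alt
    rw [← hpn, filterMap_if_pairs]
  rw [hA, hB]
  have hfst : (PySem.List.enumerate "0123456789".toList 0).map Prod.fst
      = PySem.List.pyRange 0 10 1 := by decide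
  rw [← hfst, List.filter_map]
  refine congrArg (List.map Prod.fst) (List.filter_congr ?_)
  intro ic hic
  have hE : PySem.List.enumerate "0123456789".toList 0
      = [((0:Int),'0'),(1,'1'),(2,'2'),(3,'3'),(4,'4'),(5,'5'),(6,'6'),(7,'7'),(8,'8'),(9,'9')] := by
    decide
  rw [hE] at hic
  have key : ∀ (i : Int) (c : Char), (PySem.Int.toStr i).toList = [c] →
      (fnlcFound l (PySem.Int.toStr i) && !fnlcLater l (PySem.Int.toStr i))
        = (PySem.Set.contains pn.1 c && !PySem.Set.contains pn.2 c) := by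
    intro i c hic
    rw [fnlcFound_eq l _ c hic, fnlcLater_eq l _ c hic, hP, hN]
  simp only [List.mem_cons, List.not_mem_nil, or_false] at hic
  rcases hic with rfl|rfl|rfl|rfl|rfl|rfl|rfl|rfl|rfl|rfl
  · exact key 0 '0' (by decide)
  · exact key 1 '1' (by decide)
  · exact key 2 '2' (by decide)
  · exact key 3 '3' (by decide)
  · exact key 4 '4' (by decide)
  · exact key 5 '5' (by decide)
  · exact key 6 '6' (by decide)
  · exact key 7 '7' (by decide)
  · exact key 8 '8' (by decide)
  · exact key 9 '9' (by decide)
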